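-- pv_equiv track=rewrite | github.com/sminix/skill-challenges | yahtzeeChallenge.py | yahtzee
-- ===== SOURCE A (Python) =====
-- def yahtzee(roll):
--     #find amount of dice rolls
--     length = len(roll)
--     #initialize lists for storing values and counting
--     values = []
--     count = []
--     """
--     for loop that iterates through list of dice, for each unique die value add it to
--     values list and increment same index for count
--     """
--     for i in range(length):
--         #if roll value not in value list
--         if roll[i] not in values:
--             #append it and append 1 to count list
--             values.append(roll[i])
--             count.append(1)
--
--         else:
--             #if dice value already recorded, find index of value in values
--             index = values.index(roll[i])
--             #increment same count index
--             count[index] = count[index] + 1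
--
--     """
--     this for loop takes the value and multiplies it by it associated count
--     """
--     for i in range(len(values)):
--         values[i] = values[i] * count[i]
--
--     return max(values)
-- ===== SOURCE B (Python) =====
-- def yahtzee(roll):
--     # no value/count table: rescan the roll for each die's count on the fly
--     return max(die * roll.count(die) for die in roll)
-- ===== Notes on version B (the rewrite author's own statement) =====
-- stated objective: simpler
-- what changed: Removed A's values/count table-building pass (with its in/index inner scans) and second multiply pass entirely: B is a one-line max over die * roll.count(die), recounting occurrences by rescanning the roll for each element.
import Mathlib
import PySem

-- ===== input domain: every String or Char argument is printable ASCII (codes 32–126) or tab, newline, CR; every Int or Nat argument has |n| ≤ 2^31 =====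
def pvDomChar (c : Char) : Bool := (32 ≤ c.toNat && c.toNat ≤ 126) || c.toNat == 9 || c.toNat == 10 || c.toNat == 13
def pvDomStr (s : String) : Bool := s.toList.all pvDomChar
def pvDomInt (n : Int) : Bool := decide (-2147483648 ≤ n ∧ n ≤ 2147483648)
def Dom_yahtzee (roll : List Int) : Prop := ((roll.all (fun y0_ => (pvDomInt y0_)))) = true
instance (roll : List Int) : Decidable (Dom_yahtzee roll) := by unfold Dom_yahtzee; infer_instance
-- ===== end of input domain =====

-- B drops A's values/count table and both passes for a single max over die * roll.count(die), rescanning per element (objective: simpler).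


-- ===== PORT A =====
-- one iteration of A's first loop: records a new value with count 1, or increments the count at its index
def yahtzeeStep (vc : List Int × List Int) (x : Int) : List Int × List Int :=
  if vc.1.contains x = false then
    (vc.1 ++ [x], vc.2 ++ [1])
  else
    match PySem.List.index? vc.1 x with
    | some i => (vc.1, vc.2.set i (vc.2.getD i 0 + 1))
    | none => (vc.1, vc.2)   -- unreachable: the branch is taken only when x ∈ vc.1

def yahtzee (roll : List Int) : Int :=
  let vc := roll.foldl yahtzeeStep ([], [])
  let values := List.zipWith (· * ·) vc.1 vc.2   -- second loop: values[i] = values[i] * count[i]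
  (PySem.List.max? values (fun y => y)).getD 0   -- max(values); default never used under Pre_

-- ===== PORT B =====
def yahtzee_alt (roll : List Int) : Int :=
  (PySem.List.max? (roll.map (fun die => die * (PySem.List.count roll die : Int))) (fun y => y)).getD 0

-- ===== PRECONDITION & SPEC =====
-- Pre_ excludes only the empty roll, on which both A and B raise ValueError (max of an empty sequence).
def Pre_yahtzee (roll : List Int) : Prop := roll ≠ []
instance (roll : List Int) : Decidable (Pre_yahtzee roll) := by unfold Pre_yahtzee; infer_instance
def pvWitness_yahtzee : List Int := [1, 2, 2]

def Spec_yahtzee (roll : List Int) (out : Int) : Prop := out = yahtzee_alt roll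
instance (roll : List Int) (out : Int) : Decidable (Spec_yahtzee roll out) := by unfold Spec_yahtzee; infer_instance

-- ===== CLAIM (what is proved, stated in full; the proofs are below) =====
def Claim_equal_yahtzee : Prop := ∀ (roll : List Int), Dom_yahtzee roll → Pre_yahtzee roll → Spec_yahtzee roll (yahtzee roll)

-- ===== LEMMAS AND PROOFS =====

-- the count function A maintains, as a function of the processed prefix p
def yzCnt (p : List Int) : Int → Int := fun x => ((p.count x : Nat) : Int)

-- loop invariant for A's first loop
lemma yahtzee_fold_inv (q : List Int) : ∀ (v p : List Int), v.Nodup → (∀ x, x ∈ v ↔ x ∈ p) →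
    ∃ V, q.foldl yahtzeeStep (v, v.map (yzCnt p)) = (V, V.map (yzCnt (p ++ q)))
      ∧ V.Nodup ∧ (∀ x, x ∈ V ↔ x ∈ p ++ q) := by
  induction q with
  | nil =>
    intro v p hnd hmem
    exact ⟨v, by simp, hnd, by simpa using hmem⟩
  | cons x q ih =>
    intro v p hnd hmem
    by_cases hx : x ∈ v
    · -- x already recorded: counts list gets bumped at x's index
      have hcont : v.contains x = true := by simpa using hx
      obtain ⟨i, hi⟩ : ∃ i, PySem.List.index? v x = some i := by
        cases h : PySem.List.index? v x with
        | none =>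
          exfalso
          exact (PySem.List.index?_eq_none_iff v x).mp h hx
        | some i => exact ⟨i, rfl⟩
      obtain ⟨hk, hvx, _⟩ := PySem.List.getElem_of_index?_eq_some hi
      have hstep : yahtzeeStep (v, v.map (yzCnt p)) x
          = (v, (v.map (yzCnt p)).set i (yzCnt p x + 1)) := by
        simp only [yahtzeeStep, hcont, hi]
        have hg : v[i]? = some x := by rw [List.getElem?_eq_getElem hk, hvx]
        simp [List.getD, hg]
      have hset : (v.map (yzCnt p)).set i (yzCnt p x + 1) = v.map (yzCnt (p ++ [x])) := by
        apply List.ext_getElem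
        · simp
        · intro j hj1 hj2
          have hjv : j < v.length := by simpa using hj2
          by_cases hji : j = i
          · subst hji
            rw [List.getElem_set_self (by simpa using hjv)]
            simp [yzCnt, hvx, List.count_append]
          · rw [List.getElem_set_ne (by omega)]
            have hne : v[j] ≠ x := by
              intro he
              exact hji (List.Nodup.getElem_inj_iff hnd |>.mp (by rw [he, hvx]) )
            simp [yzCnt, List.count_append, Ne.symm hne]
      have hmem' : ∀ y, y ∈ v ↔ y ∈ p ++ [x] := by
        intro y
        constructor
        · intro hy; exact List.mem_append.mpr (Or.inl ((hmem y).mp hy))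
        · intro hy
          rcases List.mem_append.mp hy with h | h
          · exact (hmem y).mpr h
          · simpa [List.mem_singleton.mp h] using hx
      obtain ⟨V, hV, hVnd, hVmem⟩ := ih v (p ++ [x]) hnd hmem'
      refine ⟨V, ?_, hVnd, ?_⟩
      · simpa [List.foldl_cons, hstep, hset, List.append_assoc] using hV
      · intro y; simpa [List.append_assoc] using hVmem y
    · -- new value: append x with count 1
      have hcont : v.contains x = false := by simpa using hx
      have hxp : x ∉ p := fun h => hx ((hmem x).mpr h)
      have hstep : yahtzeeStep (v, v.map (yzCnt p)) x
          = (v ++ [x], (v ++ [x]).map (yzCnt (p ++ [x]))) := by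
        simp only [yahtzeeStep, hcont]
        rw [if_pos trivial]
        simp only [List.map_append, List.map_cons, List.map_nil, Prod.mk.injEq, true_and]
        congr 1
        · apply List.map_congr_left
          intro y hy
          have hne : y ≠ x := fun he => hx (he ▸ hy)
          simp [yzCnt, List.count_append, Ne.symm hne]
        · simp [yzCnt, List.count_append, List.count_eq_zero.mpr hxp]
      have hnd' : (v ++ [x]).Nodup :=
        List.Nodup.append hnd (List.nodup_singleton x)
          (fun a ha hb => hx ((List.mem_singleton.mp hb) ▸ ha))
      have hmem' : ∀ y, y ∈ v ++ [x] ↔ y ∈ p ++ [x] := by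
        intro y
        simp only [List.mem_append, List.mem_singleton]
        exact or_congr (hmem y) Iff.rfl
      obtain ⟨V, hV, hVnd, hVmem⟩ := ih (v ++ [x]) (p ++ [x]) hnd' hmem'
      refine ⟨V, ?_, hVnd, ?_⟩
      · simpa [List.foldl_cons, hstep, List.append_assoc] using hV
      · intro y; simpa [List.append_assoc] using hVmem y

-- max over two nonempty lists with the same members agree
lemma maxD_eq_of_same_mem (l₁ l₂ : List Int) (h₁ : l₁ ≠ []) (h₂ : l₂ ≠ [])
    (hmem : ∀ z, z ∈ l₁ ↔ z ∈ l₂) :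
    (PySem.List.max? l₁ (fun y => y)).getD 0 = (PySem.List.max? l₂ (fun y => y)).getD 0 := by
  obtain ⟨m₁, hm₁⟩ : ∃ m, PySem.List.max? l₁ (fun y => y) = some m := by
    cases h : PySem.List.max? l₁ (fun y => y) with
    | none => exact absurd ((PySem.List.max?_eq_none_iff l₁ (fun y => y)).mp h) h₁
    | some m => exact ⟨m, rfl⟩
  obtain ⟨m₂, hm₂⟩ : ∃ m, PySem.List.max? l₂ (fun y => y) = some m := by
    cases h : PySem.List.max? l₂ (fun y => y) with
    | none => exact absurd ((PySem.List.max?_eq_none_iff l₂ (fun y => y)).mp h) h₂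
    | some m => exact ⟨m, rfl⟩
  have e12 : m₁ ≤ m₂ := PySem.List.max?_isMax hm₂ m₁ ((hmem m₁).mp (PySem.List.max?_mem hm₁))
  have e21 : m₂ ≤ m₁ := PySem.List.max?_isMax hm₁ m₂ ((hmem m₂).mpr (PySem.List.max?_mem hm₂))
  rw [hm₁, hm₂, Option.getD_some, Option.getD_some]
  omega

-- ===== VERDICT (by name: the statement is the Claim_ definition above) =====
theorem yahtzee_spec : Claim_equal_yahtzee := by
  intro roll _ hpre
  unfold Spec_yahtzee yahtzee yahtzee_alt
  obtain ⟨V, hV, hVnd, hVmem⟩ := yahtzee_fold_inv roll [] [] (by simp) (by simp)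
  have hV' : roll.foldl yahtzeeStep ([], []) = (V, V.map (yzCnt roll)) := by
    simpa using hV
  rw [hV']
  have hzip : List.zipWith (· * ·) V (V.map (yzCnt roll))
      = V.map (fun x => x * yzCnt roll x) := by
    rw [List.zipWith_map_right, List.zipWith_self]
  simp only [hzip]
  rcases List.exists_mem_of_ne_nil roll hpre with ⟨a, ha⟩
  apply maxD_eq_of_same_mem
  · -- V.map … ≠ []
    simp only [ne_eq, List.map_eq_nil_iff]
    intro hVnil
    have : a ∈ V := by simpa using (hVmem a).mpr (by simpa using ha)
    simp [hVnil] at this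
  · -- roll.map … ≠ []
    simp only [ne_eq, List.map_eq_nil_iff]
    exact hpre
  · intro z
    simp only [List.mem_map]
    constructor
    · rintro ⟨x, hx, rfl⟩
      refine ⟨x, ?_, by simp [yzCnt, PySem.List.count]⟩
      simpa using (hVmem x).mp hx
    · rintro ⟨x, hx, rfl⟩
      refine ⟨x, (hVmem x).mpr (by simpa using hx), by simp [yzCnt, PySem.List.count]⟩
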